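-- pv_equiv track=rewrite | github.com/amol93/PythonPractice | LeetCode_SingleElementinArray.py | Nonduplicate
-- ===== SOURCE A (Python) =====
-- def Nonduplicate(alist):
--   y={}								#creating a dictionary
--   for i in alist:
--     if i not in y:
--       y[i] = 0						#initialising
--       #y.values = 1
--     if i in y:
--       y[i] +=1
--
--   z= min(y,key=y.get)				#finding the minimmum key in the list
--   return z
-- ===== SOURCE B (Python) =====
-- def Nonduplicate(alist):
--   # Count occurrences by sorting and measuring run lengths (equal values are adjacent
--   # in the sorted copy), then select by a left-to-right scan keeping the first value
--   # whose count is strictly smaller than the current best's; the scan order over the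
--   # original list reproduces A's first-appearance tie-break.
--   s = sorted(alist)
--   counts = {}
--   i = 0
--   n = len(s)
--   while i < n:
--     j = i
--     while j < n and s[j] == s[i]:
--       j += 1
--     counts[s[i]] = j - i
--     i = j
--   best = alist[0]
--   for x in alist:
--     if counts[x] < counts[best]:
--       best = x
--   return best
-- ===== Notes on version B (the rewrite author's own statement) =====
-- stated objective: alternative
-- what changed: B counts occurrences by sorting the list and measuring run lengths of equal adjacent values instead of A's incremental dictionary build, and selects the answer with an explicit accumulator scan over the original list instead of min over the dict's keys.
import Mathlib
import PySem

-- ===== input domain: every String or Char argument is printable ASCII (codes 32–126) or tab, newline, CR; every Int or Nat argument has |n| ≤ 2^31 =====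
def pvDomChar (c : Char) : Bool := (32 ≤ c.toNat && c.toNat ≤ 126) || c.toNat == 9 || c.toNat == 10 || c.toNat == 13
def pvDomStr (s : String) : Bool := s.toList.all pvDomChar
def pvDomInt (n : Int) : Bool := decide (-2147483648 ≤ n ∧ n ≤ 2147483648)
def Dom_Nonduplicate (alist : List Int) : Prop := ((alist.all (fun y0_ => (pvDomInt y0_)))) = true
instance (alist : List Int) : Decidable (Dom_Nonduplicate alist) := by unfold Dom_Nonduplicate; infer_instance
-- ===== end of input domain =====

-- B counts occurrences via run lengths of the sorted list and selects by an accumulator scan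
-- over the original list (alternative algorithm, same result).

-- ===== PORT A =====
-- one iteration of A's loop: 'if i not in y: y[i] = 0'  then  'if i in y: y[i] += 1'
def pvStepA (d : PySem.Dict Int Int) (i : Int) : PySem.Dict Int Int :=
  let d1 := if d.contains i then d else d.insert i 0
  if d1.contains i then d1.insert i (d1.getD i 0 + 1) else d1

def Nonduplicate (alist : List Int) : Int :=
  let y := alist.foldl pvStepA PySem.Dict.empty
  -- min(y, key=y.get): for keys of y, y.get always yields the stored count, ported as getD _ 0
  (PySem.List.min? y.keys (fun k => y.getD k 0)).getD 0

-- ===== PORT B =====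
-- the two nested while loops of Source B: walk the sorted list run by run, recording each run's length
def pvRunCounts : List Int → PySem.Dict Int Int
  | [] => PySem.Dict.empty
  | x :: rest =>
      (pvRunCounts (rest.dropWhile (fun y => y == x))).insert x
        (1 + ((rest.takeWhile (fun y => y == x)).length : Int))
termination_by l => l.length
decreasing_by
  exact Nat.lt_succ_of_le (List.length_dropWhile_le _ _)

def Nonduplicate_alt (alist : List Int) : Int :=
  let counts := pvRunCounts (PySem.List.sorted alist (fun x => x) false)
  match alist with
  | [] => 0   -- unreachable under Pre_: Python's alist[0] raises IndexError on []
  | h :: t =>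
      t.foldl (fun best x => if counts.getD x 0 < counts.getD best 0 then x else best) h

-- ===== PRECONDITION & SPEC =====
-- Pre_ excludes only the empty list, on which both A (ValueError from min) and B (IndexError) raise.
def Pre_Nonduplicate (alist : List Int) : Prop := alist ≠ []
instance (alist : List Int) : Decidable (Pre_Nonduplicate alist) := by unfold Pre_Nonduplicate; infer_instance
def pvWitness_Nonduplicate : List Int := [3, 1, 3, 2, 1, 3]

def Spec_Nonduplicate (alist : List Int) (out : Int) : Prop := out = Nonduplicate_alt alist
instance (alist : List Int) (out : Int) : Decidable (Spec_Nonduplicate alist out) := by unfold Spec_Nonduplicate; infer_instance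

-- ===== CLAIM (what is proved, stated in full; the proofs are below) =====
def Claim_equal_Nonduplicate : Prop := ∀ (alist : List Int), Dom_Nonduplicate alist → Pre_Nonduplicate alist → Spec_Nonduplicate alist (Nonduplicate alist)

-- ===== LEMMAS AND PROOFS =====
-- A's two-branch loop body is exactly the counting insert
lemma pvStepA_eq (d : PySem.Dict Int Int) (i : Int) :
    pvStepA d i = d.insert i (d.getD i 0 + 1) := by
  unfold pvStepA
  by_cases h : d.contains i = true
  · simp [h]
  · simp only [Bool.not_eq_true] at h
    simp [h, PySem.Dict.contains_insert_self, PySem.Dict.getD_insert_self,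
      PySem.Dict.insert_insert_self, PySem.Dict.getD_of_not_contains (h := h)]

lemma pvFoldA_eq (alist : List Int) :
    alist.foldl pvStepA PySem.Dict.empty = PySem.Dict.counter alist := by
  rw [← PySem.Dict.foldl_insert_getD_add_one_eq_counter]
  apply congrFun
  apply congrFun
  apply congrArg
  funext d x
  exact pvStepA_eq d x

-- the run-length dictionary of any nondecreasing list records exact multiplicities
lemma pvRunCounts_getD (l : List Int) (hp : l.Pairwise (· ≤ ·)) (v : Int) :
    (pvRunCounts l).getD v 0 = (l.count v : Int) := by
  induction l using pvRunCounts.induct with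
  | case1 => simp [pvRunCounts, PySem.Dict.getD, PySem.Dict.get?, PySem.Dict.empty]
  | case2 x rest ih =>
    have hrest : rest.Pairwise (· ≤ ·) := (List.pairwise_cons.mp hp).2
    have hxall : ∀ y ∈ rest, x ≤ y := (List.pairwise_cons.mp hp).1
    have hdp : (rest.dropWhile (fun y => y == x)).Pairwise (· ≤ ·) :=
      hrest.sublist (List.dropWhile_sublist _)
    have hsplit := List.takeWhile_append_dropWhile (p := fun y => y == x) (l := rest)
    -- every element of the takeWhile part equals x
    have htk : ∀ y ∈ rest.takeWhile (fun y => y == x), y = x := by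
      intro y hy
      have := List.mem_takeWhile_imp hy
      simpa using this
    -- x does not occur in the dropWhile part
    have hxdr : x ∉ rest.dropWhile (fun y => y == x) := by
      intro hmem
      cases hdr : rest.dropWhile (fun y => y == x) with
      | nil => simp [hdr] at hmem
      | cons d0 dr' =>
        have hd0 : ¬ (d0 == x) = true := by
          have := List.head?_dropWhile_not (p := fun y => y == x) (l := rest)
          simp [hdr] at this
          simpa using this
        have hd0x : d0 ≠ x := by simpa using hd0
        have hd0mem : d0 ∈ rest := by
          have : d0 ∈ rest.dropWhile (fun y => y == x) := by simp [hdr]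
          exact (List.dropWhile_sublist _).mem this
        have hxd0 : x ≤ d0 := hxall d0 hd0mem
        rw [hdr] at hmem
        rcases List.mem_cons.mp hmem with h1 | h2
        · exact hd0x h1.symm
        · have hdp' := hdp
          rw [hdr] at hdp'
          have : d0 ≤ x := (List.pairwise_cons.mp hdp').1 x h2
          exact hd0x (le_antisymm this hxd0)
    rw [pvRunCounts, PySem.Dict.getD_insert]
    by_cases hv : v = x
    · subst hv
      have hcdr : (rest.dropWhile (fun y => y == v)).count v = 0 :=
        List.count_eq_zero.mpr hxdr
      have hctk : (rest.takeWhile (fun y => y == v)).count v =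
          (rest.takeWhile (fun y => y == v)).length :=
        List.count_eq_length.mpr (fun b hb => (htk b hb).symm)
      have hcr : rest.count v = (rest.takeWhile (fun y => y == v)).length := by
        conv_lhs => rw [← hsplit]
        rw [List.count_append, hctk, hcdr]
        omega
      rw [if_pos rfl, List.count_cons_self, hcr]
      push_cast
      ring
    · have hctk : (rest.takeWhile (fun y => y == x)).count v = 0 :=
        List.count_eq_zero.mpr (fun hmem => hv (htk v hmem))
      have : rest.count v = (rest.dropWhile (fun y => y == x)).count v := by
        conv_lhs => rw [← hsplit]
        rw [List.count_append, hctk]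
        omega
      rw [if_neg hv, ih hdp]
      simp [this, Ne.symm hv]

-- min? over a snoc
lemma pvMin?_append_singleton {α : Type} (l : List α) (x : α) (k : α → Int) :
    PySem.List.min? (l ++ [x]) k =
      match PySem.List.min? l k with
      | none => some x
      | some m => if k x < k m then some x else some m := by
  simp only [PySem.List.min?, List.foldl_append, List.foldl]
  rfl

-- dropping later duplicates does not change Python's first-minimum
lemma pvMin?_dedup (l : List Int) (k : Int → Int) :
    PySem.List.min? (PySem.List.dedup l) k = PySem.List.min? l k := by
  induction l using List.reverseRecOn with
  | nil => simp [PySem.List.dedup, PySem.List.min?, PySem.Set.ofList]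
  | append_singleton l x ih =>
    rw [pvMin?_append_singleton]
    rw [PySem.List.dedup_eq_ofList, PySem.Set.ofList_append_singleton, PySem.Set.add]
    by_cases hc : PySem.Set.contains (PySem.Set.ofList l) x = true
    · have hxl : x ∈ l := by
        have : x ∈ PySem.Set.ofList l := by
          simpa [PySem.Set.contains] using hc
        exact (PySem.Set.mem_ofList _ _).mp this
      have hne : l ≠ [] := List.ne_nil_of_mem hxl
      obtain ⟨m, hm⟩ : ∃ m, PySem.List.min? l k = some m := by
        cases hmin : PySem.List.min? l k with
        | none => exact absurd ((PySem.List.min?_eq_none_iff _ _).mp hmin) hne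
        | some m => exact ⟨m, rfl⟩
      have hle : k m ≤ k x := PySem.List.min?_isMin hm x hxl
      rw [if_pos hc, hm, ← PySem.List.dedup_eq_ofList, ih, hm]
      simp [not_lt.mpr hle]
    · rw [if_neg hc, pvMin?_append_singleton, ← PySem.List.dedup_eq_ofList, ih]

-- B's accumulator scan is min? on the nonempty list
lemma pvScan_eq_min? (k : Int → Int) (t : List Int) (h : Int) :
    some (t.foldl (fun best x => if k x < k best then x else best) h) =
      PySem.List.min? (h :: t) k := by
  induction t generalizing h with
  | nil => simp [PySem.List.min?]
  | cons a t ih =>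
    simp only [PySem.List.min?, List.foldl] at *
    by_cases hlt : k a < k h
    · simp [hlt, ← ih]
    · simp [hlt, ← ih]

-- ===== VERDICT (by name: the statement is the Claim_ definition above) =====
theorem Nonduplicate_spec : Claim_equal_Nonduplicate := by
  intro alist _ hpre
  unfold Spec_Nonduplicate Nonduplicate Nonduplicate_alt
  rw [pvFoldA_eq]
  -- the run-length key function is exactly the multiplicity in alist
  have hkey : (fun x => (pvRunCounts (PySem.List.sorted alist (fun x => x) false)).getD x 0)
      = fun x => (alist.count x : Int) := by
    funext v
    have hp : (PySem.List.sorted alist (fun x => x) false).Pairwise (· ≤ ·) := by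
      simpa using PySem.List.sorted_pairwise alist (fun x => x)
    rw [pvRunCounts_getD _ hp v,
      (PySem.List.sorted_perm alist (fun x => x) false).count_eq]
  cases alist with
  | nil => exact absurd rfl hpre
  | cons h t =>
    have hk := congrFun hkey
    simp only [PySem.Dict.keys_counter, PySem.Dict.getD_counter,
      ← PySem.List.dedup_eq_ofList, hk]
    rw [pvMin?_dedup (h :: t) (fun k => ((h :: t).count k : Int)),
      ← pvScan_eq_min? (fun x => ((h :: t).count x : Int)) t h]
    rfl
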